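-- pv_equiv track=rewrite | github.com/timleung22/AOC2017 | day20.py | calculateParticle
-- ===== SOURCE A (Python) =====
-- def calculateParticle(position, velocity, acceleration, runs):
--     for i in range(runs):
--         velocity[0] += acceleration[0]
--         velocity[1] += acceleration[1]
--         velocity[2] += acceleration[2]
--         position[0] += velocity[0]
--         position[1] += velocity[1]
--         position[2] += velocity[2]
--
--     return [position[0], position[1], position[2]], [velocity[0], velocity[1], velocity[2]], acceleration
-- ===== SOURCE B (Python) =====
-- def calculateParticle(position, velocity, acceleration, runs):
--     # Closed form: after n steps, v' = v + n*a and p' = p + n*v + a*n*(n+1)/2.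
--     # Does not mutate its arguments (A updates position/velocity in place).
--     n = max(runs, 0)
--     tri = n * (n + 1) // 2
--     new_velocity = [velocity[i] + n * acceleration[i] for i in range(3)]
--     new_position = [position[i] + n * velocity[i] + tri * acceleration[i] for i in range(3)]
--     return new_position, new_velocity, acceleration
-- ===== Notes on version B (the rewrite author's own statement) =====
-- stated objective: alternative
-- what changed: Replaces the runs-iteration simulation loop by the closed-form kinematics formulas v+=n*a, p+=n*v+a*n(n+1)/2 (return-value equivalence; A also mutates position/velocity in place, B does not).
-- outside the precondition, e.g. on calculateParticle([1, 2, 3], [4, 5, 6], [], 0): A returns ([1, 2, 3], [4, 5, 6], []), B raises IndexError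
import Mathlib
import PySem

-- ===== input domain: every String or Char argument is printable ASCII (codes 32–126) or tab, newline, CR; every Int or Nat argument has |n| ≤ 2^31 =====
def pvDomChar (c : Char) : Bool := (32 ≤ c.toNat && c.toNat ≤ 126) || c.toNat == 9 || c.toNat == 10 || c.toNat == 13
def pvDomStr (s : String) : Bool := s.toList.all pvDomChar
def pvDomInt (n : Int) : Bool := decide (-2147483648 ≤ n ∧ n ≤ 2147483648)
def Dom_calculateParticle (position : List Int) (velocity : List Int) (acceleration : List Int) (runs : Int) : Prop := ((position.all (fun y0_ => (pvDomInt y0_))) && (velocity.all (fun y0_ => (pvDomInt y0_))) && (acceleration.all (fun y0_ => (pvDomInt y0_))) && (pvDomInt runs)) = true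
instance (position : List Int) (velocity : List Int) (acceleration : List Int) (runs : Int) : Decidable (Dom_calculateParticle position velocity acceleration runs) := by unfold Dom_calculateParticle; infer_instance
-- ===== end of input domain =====

-- B replaces A's runs-iteration simulation loop by the closed-form kinematics formulas v+n*a, p+n*v+a*n(n+1)/2.
-- Equivalence is about the RETURN value only: A mutates position/velocity in place, B does not.

-- ===== PORT A =====
-- one loop iteration of A: velocity[i] += acceleration[i] then position[i] += velocity[i]
def aStep (a0 a1 a2 : Int) (s : (Int × Int × Int) × (Int × Int × Int)) : (Int × Int × Int) × (Int × Int × Int) :=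
  let v0 := s.2.1 + a0
  let v1 := s.2.2.1 + a1
  let v2 := s.2.2.2 + a2
  ((s.1.1 + v0, s.1.2.1 + v1, s.1.2.2 + v2), (v0, v1, v2))

-- the list cells A reads/writes, carried as the loop state; '.getD 0' is exact inside
-- Pre_ (all indices are in range there).
def calculateParticle (position : List Int) (velocity : List Int) (acceleration : List Int) (runs : Int) : List Int × List Int × List Int :=
  let a0 := (PySem.List.pyGet? acceleration 0).getD 0
  let a1 := (PySem.List.pyGet? acceleration 1).getD 0
  let a2 := (PySem.List.pyGet? acceleration 2).getD 0
  let init := (((PySem.List.pyGet? position 0).getD 0, (PySem.List.pyGet? position 1).getD 0, (PySem.List.pyGet? position 2).getD 0),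
               ((PySem.List.pyGet? velocity 0).getD 0, (PySem.List.pyGet? velocity 1).getD 0, (PySem.List.pyGet? velocity 2).getD 0))
  let fin := (PySem.List.pyRange 0 runs 1).foldl (fun s _ => aStep a0 a1 a2 s) init
  ([fin.1.1, fin.1.2.1, fin.1.2.2], [fin.2.1, fin.2.2.1, fin.2.2.2], acceleration)

-- ===== PORT B =====
def calculateParticle_alt (position : List Int) (velocity : List Int) (acceleration : List Int) (runs : Int) : List Int × List Int × List Int :=
  let n : Int := max runs 0
  let tri : Int := PySem.Int.floordiv (n * (n + 1)) 2
  let newVel := (PySem.List.pyRange 0 3 1).map (fun i =>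
    (PySem.List.pyGet? velocity i).getD 0 + n * (PySem.List.pyGet? acceleration i).getD 0)
  let newPos := (PySem.List.pyRange 0 3 1).map (fun i =>
    (PySem.List.pyGet? position i).getD 0 + n * (PySem.List.pyGet? velocity i).getD 0 + tri * (PySem.List.pyGet? acceleration i).getD 0)
  (newPos, newVel, acceleration)

-- ===== PRECONDITION & SPEC =====
-- Pre_ excludes inputs where some list has fewer than 3 elements: there A raises IndexError,
-- except when runs ≤ 0 and only acceleration is short (A then returns without ever reading
-- acceleration, while B's closed form always reads it and raises).
def Pre_calculateParticle (position : List Int) (velocity : List Int) (acceleration : List Int) (runs : Int) : Prop :=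
  3 ≤ position.length ∧ 3 ≤ velocity.length ∧ 3 ≤ acceleration.length
instance (position : List Int) (velocity : List Int) (acceleration : List Int) (runs : Int) : Decidable (Pre_calculateParticle position velocity acceleration runs) := by unfold Pre_calculateParticle; infer_instance

def pvWitness_calculateParticle : List Int × List Int × List Int × Int := ([1, 2, 3], [4, 5, 6], [7, 8, 9], 3)

def Spec_calculateParticle (position : List Int) (velocity : List Int) (acceleration : List Int) (runs : Int) (out : List Int × List Int × List Int) : Prop := out = calculateParticle_alt position velocity acceleration runs
instance (position : List Int) (velocity : List Int) (acceleration : List Int) (runs : Int) (out : List Int × List Int × List Int) : Decidable (Spec_calculateParticle position velocity acceleration runs out) := by unfold Spec_calculateParticle; infer_instance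

-- ===== CLAIM (what is proved, stated in full; the proofs are below) =====
def Claim_equal_calculateParticle : Prop := ∀ (position : List Int) (velocity : List Int) (acceleration : List Int) (runs : Int), Dom_calculateParticle position velocity acceleration runs → Pre_calculateParticle position velocity acceleration runs → Spec_calculateParticle position velocity acceleration runs (calculateParticle position velocity acceleration runs)

-- ===== LEMMAS AND PROOFS =====

-- triangular numbers, recursively
def tri : Nat → Int
  | 0 => 0
  | n + 1 => tri n + (n + 1)

lemma two_mul_tri (n : Nat) : 2 * tri n = (n : Int) * ((n : Int) + 1) := by
  induction n with
  | zero => simp [tri]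
  | succ n ih => simp only [tri]; push_cast; push_cast at ih; ring_nf; ring_nf at ih; omega

lemma floordiv_tri (n : Nat) : PySem.Int.floordiv ((n : Int) * ((n : Int) + 1)) 2 = tri n := by
  rw [← two_mul_tri, PySem.Int.floordiv_eq_ediv_of_pos (by norm_num)]
  exact Int.mul_ediv_cancel_left _ (by norm_num)

lemma foldl_ignore {α β : Type} (g : α → α) (l : List β) (s : α) :
    l.foldl (fun t _ => g t) s = g^[l.length] s := by
  induction l generalizing s with
  | nil => rfl
  | cons x xs ih => simp [List.foldl_cons, ih, Function.iterate_succ_apply]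

lemma aStep_iterate (a0 a1 a2 : Int) (n : Nat) (p0 p1 p2 v0 v1 v2 : Int) :
    (aStep a0 a1 a2)^[n] ((p0, p1, p2), (v0, v1, v2)) =
      ((p0 + n * v0 + tri n * a0, p1 + n * v1 + tri n * a1, p2 + n * v2 + tri n * a2),
       (v0 + n * a0, v1 + n * a1, v2 + n * a2)) := by
  induction n generalizing p0 p1 p2 v0 v1 v2 with
  | zero => simp [tri]
  | succ n ih =>
    rw [Function.iterate_succ_apply, aStep]
    simp only []
    rw [ih]
    simp only [tri, Prod.mk.injEq]
    push_cast
    refine ⟨⟨by ring, by ring, by ring⟩, by ring, by ring, by ring⟩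

lemma max_eq_toNat (r : Int) : max r 0 = ((r.toNat : Nat) : Int) := by
  rw [Int.toNat_eq_max]

-- ===== VERDICT (by name: the statement is the Claim_ definition above) =====
theorem calculateParticle_spec : Claim_equal_calculateParticle := by
  intro position velocity acceleration runs _ hpre
  obtain ⟨hp, hv, ha⟩ := hpre
  obtain ⟨p0, p1, p2, pr, rfl⟩ : ∃ a b c r, position = a :: b :: c :: r := by
    match position, hp with
    | a :: b :: c :: r, _ => exact ⟨a, b, c, r, rfl⟩
  obtain ⟨v0, v1, v2, vr, rfl⟩ : ∃ a b c r, velocity = a :: b :: c :: r := by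
    match velocity, hv with
    | a :: b :: c :: r, _ => exact ⟨a, b, c, r, rfl⟩
  obtain ⟨a0, a1, a2, ar, rfl⟩ : ∃ a b c r, acceleration = a :: b :: c :: r := by
    match acceleration, ha with
    | a :: b :: c :: r, _ => exact ⟨a, b, c, r, rfl⟩
  unfold Spec_calculateParticle calculateParticle calculateParticle_alt
  have hget : ∀ (x0 x1 x2 : Int) (xs : List Int),
      (PySem.List.pyGet? (x0 :: x1 :: x2 :: xs) 0).getD 0 = x0 ∧
      (PySem.List.pyGet? (x0 :: x1 :: x2 :: xs) 1).getD 0 = x1 ∧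
      (PySem.List.pyGet? (x0 :: x1 :: x2 :: xs) 2).getD 0 = x2 := by
    intro x0 x1 x2 xs
    refine ⟨?_, ?_, ?_⟩ <;> simp [PySem.List.pyGet?, PySem.List.pyIdx?] <;>
      rw [if_pos (by push_cast; omega)] <;> simp
  obtain ⟨hP0, hP1, hP2⟩ := hget p0 p1 p2 pr
  obtain ⟨hV0, hV1, hV2⟩ := hget v0 v1 v2 vr
  obtain ⟨hA0, hA1, hA2⟩ := hget a0 a1 a2 ar
  have hrange : PySem.List.pyRange 0 3 1 = [0, 1, 2] := by decide
  simp only [hrange, List.map_cons, List.map_nil, hP0, hP1, hP2, hV0, hV1, hV2, hA0, hA1, hA2]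
  rw [foldl_ignore (aStep a0 a1 a2), PySem.List.length_pyRange_one]
  have hn : runs - 0 = runs := by ring
  rw [hn, aStep_iterate]
  rw [max_eq_toNat, floordiv_tri]
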